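-- pv_equiv track=rewrite | github.com/Demeter2025/AndroVET | tools.py | group_indices
-- ===== SOURCE A (Python) =====
-- def group_indices(indices):
--     if len(indices) == 0:
--         return []
--     groups = []
--     current_group = []
--
--     for index in sorted(indices):
--         if not current_group or index - current_group[-1] <= 2:
--             current_group.append(index)
--         else:
--             groups.append(current_group)
--             current_group = [index]
--
--     if current_group:
--         groups.append(current_group)
--
--     return groups
-- ===== SOURCE B (Python) =====
-- def group_indices(indices):
--     s = sorted(indices)
--     out = []
--     start = 0
--     n = len(s)
--     while start < n:
--         i = start + 1
--         while i < n and s[i] - s[i-1] <= 2: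
--             i += 1
--         out.append(s[start:i])
--         start = i
--     return out
-- ===== Notes on version B (the rewrite author's own statement) =====
-- stated objective: alternative
-- what changed: Replaces A's single stateful accumulator loop (current_group carried across iterations, flushed on a gap) by repeatedly scanning the maximal leading run of the sorted list and slicing it off as one group.
import Mathlib
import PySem

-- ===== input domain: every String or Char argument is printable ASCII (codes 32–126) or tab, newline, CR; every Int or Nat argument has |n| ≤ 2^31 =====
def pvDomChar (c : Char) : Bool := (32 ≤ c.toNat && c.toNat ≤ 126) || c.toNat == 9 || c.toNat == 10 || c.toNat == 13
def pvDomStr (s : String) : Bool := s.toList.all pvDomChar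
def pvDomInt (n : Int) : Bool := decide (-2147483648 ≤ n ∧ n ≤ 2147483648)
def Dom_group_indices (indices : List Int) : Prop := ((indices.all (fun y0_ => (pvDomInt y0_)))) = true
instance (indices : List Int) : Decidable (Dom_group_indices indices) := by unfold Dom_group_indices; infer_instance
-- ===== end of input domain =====

-- B replaces A's stateful accumulator loop by repeatedly slicing off the maximal leading run
-- of the sorted list (objective: alternative decomposition, same cost).

-- ===== PORT A =====
-- the body of A's for-loop (groups, current_group are the fold state)
def pvStepA (st : List (List Int) × List Int) (index : Int) : List (List Int) × List Int :=
  if st.2 = [] then (st.1, st.2 ++ [index])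
  else if index - (PySem.List.pyGet? st.2 (-1)).getD 0 ≤ 2 then (st.1, st.2 ++ [index])
  else (st.1 ++ [st.2], [index])

-- the final 'if current_group: groups.append(current_group)'
def pvFinishA (st : List (List Int) × List Int) : List (List Int) :=
  if st.2 ≠ [] then st.1 ++ [st.2] else st.1

def group_indices (indices : List Int) : List (List Int) :=
  if indices.length == 0 then []
  else pvFinishA ((PySem.List.sorted indices (fun x => x) false).foldl pvStepA ([], []))

-- ===== PORT B =====
-- inner while loop: number of further elements in the run starting after `prev`
def pvRunLen (prev : Int) : List Int → Nat
  | [] => 0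
  | x :: xs => if x - prev ≤ 2 then 1 + pvRunLen x xs else 0

-- outer while loop: peel the leading run off (s[start:i] = take, advancing start = drop)
def pvPeel : List Int → List (List Int)
  | [] => []
  | x :: xs =>
      (x :: xs.take (pvRunLen x xs)) :: pvPeel (xs.drop (pvRunLen x xs))
termination_by s => s.length
decreasing_by simp

def group_indices_alt (indices : List Int) : List (List Int) :=
  pvPeel (PySem.List.sorted indices (fun x => x) false)

-- ===== PRECONDITION & SPEC =====
def Spec_group_indices (indices : List Int) (out : List (List Int)) : Prop := out = group_indices_alt indices
instance (indices : List Int) (out : List (List Int)) : Decidable (Spec_group_indices indices out) := by unfold Spec_group_indices; infer_instance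

-- ===== CLAIM (what is proved, stated in full; the proofs are below) =====
def Claim_equal_group_indices : Prop := ∀ (indices : List Int), Dom_group_indices indices → Spec_group_indices indices (group_indices indices)

-- ===== LEMMAS AND PROOFS =====

theorem pvPeel_nil : pvPeel [] = [] := by rw [pvPeel]

theorem pvPeel_cons (x : Int) (xs : List Int) :
    pvPeel (x :: xs) = (x :: xs.take (pvRunLen x xs)) :: pvPeel (xs.drop (pvRunLen x xs)) := by
  rw [pvPeel]

-- loop invariant: with a nonempty current group ending in p, finishing A's fold yields the
-- current group extended by the leading run of the remaining list, then B's peeling of the rest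
theorem pvLoop (s : List Int) : ∀ (groups : List (List Int)) (cur : List Int) (p : Int),
    cur.getLast? = some p →
    pvFinishA (s.foldl pvStepA (groups, cur)) =
      groups ++ (cur ++ s.take (pvRunLen p s)) :: pvPeel (s.drop (pvRunLen p s)) := by
  induction s with
  | nil =>
      intro groups cur p h
      have hne : cur ≠ [] := by intro hc; simp [hc] at h
      simp [pvFinishA, hne, pvPeel_nil, pvRunLen]
  | cons x xs ih =>
      intro groups cur p h
      have hne : cur ≠ [] := by intro hc; simp [hc] at h
      by_cases hgap : x - p ≤ 2
      · have hstep : pvStepA (groups, cur) x = (groups, cur ++ [x]) := by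
          simp [pvStepA, hne, PySem.List.pyGet?_neg_one, h, hgap]
        have hlast : (cur ++ [x]).getLast? = some x := by simp
        simp only [List.foldl_cons, hstep, ih groups (cur ++ [x]) x hlast,
          pvRunLen, hgap, if_pos]
        simp [List.take_succ_cons, List.drop_succ_cons, Nat.add_comm]
      · have hstep : pvStepA (groups, cur) x = (groups ++ [cur], [x]) := by
          simp [pvStepA, hne, PySem.List.pyGet?_neg_one, h, hgap]
        have hlast : ([x] : List Int).getLast? = some x := by simp
        simp only [List.foldl_cons, hstep, ih (groups ++ [cur]) [x] x hlast,
          pvRunLen, hgap, if_neg, not_false_iff]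
        simp [pvPeel_cons]

-- ===== VERDICT (by name: the statement is the Claim_ definition above) =====
theorem group_indices_spec : Claim_equal_group_indices := by
  intro indices _
  unfold Spec_group_indices group_indices group_indices_alt
  cases hind : indices with
  | nil => simp [pvPeel_nil, PySem.List.sorted]
  | cons a rest =>
      have hlen : (PySem.List.sorted (a :: rest) (fun x => x) false).length = rest.length + 1 := by
        simp [PySem.List.length_sorted]
      cases hs : PySem.List.sorted (a :: rest) (fun x => x) false with
      | nil => simp [hs] at hlen
      | cons x xs =>
          have hstep0 : pvStepA ([], []) x = ([], [x]) := by simp [pvStepA]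
          simp only [List.length_cons, List.foldl_cons, hstep0,
            pvLoop xs [] [x] x (by simp)]
          simp [pvPeel_cons]
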